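-- pv_equiv track=rewrite | github.com/elizaluna007/database_project | database.py | split_string_with_delimiters
-- ===== SOURCE A (Python) =====
-- def split_string_with_delimiters(string):
--     result = []
--     current_str = ""
--
--     for char in string:
--         if char == "," or char == ";" or char == "(" or char == ")" or char == " ":
--             if (current_str != ""):
--                 result.append(current_str)
--             if (char == "("):
--                 result.append("(")
--             elif (char == ")"):
--                 result.append(")")
--             current_str = ""
--         else:
--             current_str = current_str+char
--     if (current_str != ""):
--         result.append(current_str)
--     return result
-- ===== SOURCE B (Python) =====
-- def split_string_with_delimiters(string):
--     DELIMS = ",;() "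
--     tokens = []
--     i, n = 0, len(string)
--     while i < n:
--         c = string[i]
--         if c == "(" or c == ")":
--             tokens.append(c)
--             i += 1
--         elif c in DELIMS:
--             i += 1
--         else:
--             j = i + 1
--             while j < n and string[j] not in DELIMS:
--                 j += 1
--             tokens.append(string[i:j])
--             i = j
--     return tokens
-- ===== Notes on version B (the rewrite author's own statement) =====
-- stated objective: alternative
-- what changed: Replaced A's char-by-char loop that grows a current-token accumulator with an index-based scanner that emits each paren as a token, skips other delimiters, and slices out maximal non-delimiter runs in one jump.
import Mathlib
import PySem

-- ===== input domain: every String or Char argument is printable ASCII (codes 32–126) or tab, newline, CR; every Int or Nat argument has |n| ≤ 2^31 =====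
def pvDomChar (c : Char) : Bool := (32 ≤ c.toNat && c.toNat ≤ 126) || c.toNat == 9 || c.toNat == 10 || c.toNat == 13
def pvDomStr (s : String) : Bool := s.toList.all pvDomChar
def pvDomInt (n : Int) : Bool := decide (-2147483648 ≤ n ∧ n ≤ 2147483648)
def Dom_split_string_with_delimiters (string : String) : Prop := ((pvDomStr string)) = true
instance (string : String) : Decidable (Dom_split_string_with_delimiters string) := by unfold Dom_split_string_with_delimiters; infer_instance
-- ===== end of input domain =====

-- B replaces A's char-by-char accumulator loop with a maximal-run scanner
-- (emit parens as tokens, skip other delimiters, slice maximal non-delimiter runs);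
-- objective: alternative decomposition, same O(n) cost.


-- ===== PORT A =====
-- A's loop: walk the characters keeping (result, current_str); on a delimiter flush
-- current_str (and emit the paren itself), otherwise extend current_str.
def pvALoop : List Char → List String → List Char → List String
  | [], result, cur => if cur ≠ [] then result ++ [String.ofList cur] else result
  | c :: rest, result, cur =>
    if c = ',' ∨ c = ';' ∨ c = '(' ∨ c = ')' ∨ c = ' ' then
      let result := if cur ≠ [] then result ++ [String.ofList cur] else result
      let result :=
        if c = '(' then result ++ ["("]
        else if c = ')' then result ++ [")"]
        else result
      pvALoop rest result []
    else
      pvALoop rest result (cur ++ [c])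

def split_string_with_delimiters (string : String) : List String :=
  pvALoop string.toList [] []

-- ===== PORT B =====
-- Source B's DELIMS membership test
def pvIsDelim (c : Char) : Bool := c = ',' || c = ';' || c = '(' || c = ')' || c = ' '

-- Source B's index scanner: paren → its own token; other delimiter → skip; otherwise
-- advance to the end of the maximal non-delimiter run and emit that slice.
def pvBScan : List Char → List String
  | [] => []
  | c :: rest =>
    if c = '(' ∨ c = ')' then String.ofList [c] :: pvBScan rest
    else if pvIsDelim c then pvBScan rest
    else String.ofList (c :: rest.takeWhile (fun x => !pvIsDelim x)) ::
         pvBScan (rest.dropWhile (fun x => !pvIsDelim x))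
termination_by l => l.length
decreasing_by
  · simp
  · simp
  · simp only [List.length_cons]
    exact Nat.lt_succ_of_le (List.length_dropWhile_le _ _)

def split_string_with_delimiters_alt (string : String) : List String :=
  pvBScan string.toList

-- ===== PRECONDITION & SPEC =====
def Spec_split_string_with_delimiters (string : String) (out : List String) : Prop := out = split_string_with_delimiters_alt string
instance (string : String) (out : List String) : Decidable (Spec_split_string_with_delimiters string out) := by unfold Spec_split_string_with_delimiters; infer_instance

-- ===== CLAIM (what is proved, stated in full; the proofs are below) =====
def Claim_equal_split_string_with_delimiters : Prop := ∀ (string : String), Dom_split_string_with_delimiters string → Spec_split_string_with_delimiters string (split_string_with_delimiters string)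

-- ===== LEMMAS AND PROOFS =====

lemma pvIsDelim_iff (c : Char) :
    pvIsDelim c = true ↔ (c = ',' ∨ c = ';' ∨ c = '(' ∨ c = ')' ∨ c = ' ') := by
  simp only [pvIsDelim, Bool.or_eq_true, decide_eq_true_eq]
  tauto

lemma pvTake_run (l rest : List Char) (hl : ∀ x ∈ l, pvIsDelim x = false)
    (hrest : rest = [] ∨ ∃ d rest', rest = d :: rest' ∧ pvIsDelim d = true) :
    (l ++ rest).takeWhile (fun x => !pvIsDelim x) = l := by
  induction l with
  | nil =>
    rcases hrest with rfl | ⟨d, rest', rfl, hd⟩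
    · simp
    · simp [hd]
  | cons y ys ih =>
    have hy := hl y (by simp)
    simp only [List.cons_append, List.takeWhile_cons, hy]
    simp [ih (fun x hx => hl x (by simp [hx]))]

lemma pvDrop_run (l rest : List Char) (hl : ∀ x ∈ l, pvIsDelim x = false)
    (hrest : rest = [] ∨ ∃ d rest', rest = d :: rest' ∧ pvIsDelim d = true) :
    (l ++ rest).dropWhile (fun x => !pvIsDelim x) = rest := by
  induction l with
  | nil =>
    rcases hrest with rfl | ⟨d, rest', rfl, hd⟩
    · simp
    · simp [hd]
  | cons y ys ih =>
    have hy := hl y (by simp)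
    simp only [List.cons_append, List.dropWhile_cons, hy]
    simp [ih (fun x hx => hl x (by simp [hx]))]

-- a nonempty all-non-delimiter run followed by nothing-or-a-delimiter is one B token
lemma pvBScan_run (cur rest : List Char) (hne : cur ≠ [])
    (hcur : ∀ x ∈ cur, pvIsDelim x = false)
    (hrest : rest = [] ∨ ∃ d rest', rest = d :: rest' ∧ pvIsDelim d = true) :
    pvBScan (cur ++ rest) = String.ofList cur :: pvBScan rest := by
  obtain ⟨c, cur', rfl⟩ := List.exists_cons_of_ne_nil hne
  have hc := hcur c (by simp)
  have hcur' : ∀ x ∈ cur', pvIsDelim x = false := fun x hx => hcur x (by simp [hx])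
  have hnotparen : ¬ (c = '(' ∨ c = ')') := by
    rintro (rfl | rfl) <;> simp [pvIsDelim] at hc
  have hcrest : rest = [] ∨ ∃ d rest', rest = d :: rest' ∧ pvIsDelim d = true := hrest
  have htake := pvTake_run cur' rest hcur' hcrest
  have hdrop := pvDrop_run cur' rest hcur' hcrest
  simp [pvBScan, hnotparen, hc, htake, hdrop]

-- main invariant: A's loop state (result, cur) corresponds to B scanning cur ++ cs
lemma pvALoop_eq_scan (cs : List Char) :
    ∀ result cur, (∀ x ∈ cur, pvIsDelim x = false) →
      pvALoop cs result cur = result ++ pvBScan (cur ++ cs) := by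
  induction cs with
  | nil =>
    intro result cur hcur
    by_cases hne : cur = []
    · subst hne; simp [pvALoop, pvBScan]
    · rw [pvBScan_run cur [] hne hcur (Or.inl rfl)]
      simp [pvALoop, hne, pvBScan]
  | cons c cs ih =>
    intro result cur hcur
    by_cases hd : c = ',' ∨ c = ';' ∨ c = '(' ∨ c = ')' ∨ c = ' '
    · have hdb : pvIsDelim c = true := (pvIsDelim_iff c).mpr hd
      have hscan : pvBScan (cur ++ c :: cs) =
          (if cur ≠ [] then [String.ofList cur] else []) ++ pvBScan (c :: cs) := by
        by_cases hne : cur = []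
        · subst hne; simp
        · rw [pvBScan_run cur (c :: cs) hne hcur (Or.inr ⟨c, cs, rfl, hdb⟩)]
          simp [hne]
      have hhead : pvBScan (c :: cs) =
          (if c = '(' then ["("] else if c = ')' then [")"] else []) ++ pvBScan cs := by
        by_cases hp : c = '(' ∨ c = ')'
        · rcases hp with rfl | rfl <;> simp [pvBScan] <;> decide
        · have : ¬ c = '(' ∧ ¬ c = ')' := by tauto
          simp [pvBScan, hdb, this.1, this.2]
      simp only [pvALoop, if_pos hd]
      rw [ih _ [] (by simp), hscan, hhead]
      by_cases hne : cur = [] <;> by_cases hp1 : c = '(' <;> by_cases hp2 : c = ')' <;>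
        simp [hne, hp1, hp2, List.append_assoc]
    · have hdb : pvIsDelim c = false := by
        cases h : pvIsDelim c
        · rfl
        · exact absurd ((pvIsDelim_iff c).mp h) hd
      have hcur' : ∀ x ∈ cur ++ [c], pvIsDelim x = false := by
        intro x hx
        rcases List.mem_append.mp hx with h | h
        · exact hcur x h
        · simp at h; subst h; exact hdb
      simp only [pvALoop, if_neg hd]
      rw [ih _ (cur ++ [c]) hcur']
      simp [List.append_assoc]

-- ===== VERDICT (by name: the statement is the Claim_ definition above) =====
theorem split_string_with_delimiters_spec : Claim_equal_split_string_with_delimiters := by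
  intro string _
  unfold Spec_split_string_with_delimiters split_string_with_delimiters split_string_with_delimiters_alt
  rw [pvALoop_eq_scan string.toList [] [] (by simp)]
  simp
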